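-- pv_equiv track=rewrite | github.com/whil0012/AdventOfCode | AdventOfCodeDay08.py | count_in_memory_characters
-- ===== SOURCE A (Python) =====
-- def count_in_memory_characters(code_string):
--     test_string = code_string.strip()
--     if test_string[0] != '"' or test_string[-1] != '"':
--         raise Exception("String must begin and end with a double quote character: {0}".format(code_string))
--     test_string = test_string[1:-1]
--     in_escape_sequence = False
--     count = 0
--     for i in range(len(test_string)):
--         if in_escape_sequence:
--             if test_string[i] == 'x':
--                 count -= 2
--             count += 1
--             in_escape_sequence = False
--         elif test_string[i] == '\\':
--             in_escape_sequence = True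
--         else:
--             count += 1
--     return count
-- ===== SOURCE B (Python) =====
-- def count_in_memory_characters(code_string):
--     test_string = code_string.strip()
--     if test_string[0] != '"' or test_string[-1] != '"':
--         raise Exception("String must begin and end with a double quote character: {0}".format(code_string))
--     inner = test_string[1:-1]
--     n = len(inner)
--     count = n
--     i = 0
--     while True:
--         j = inner.find('\\', i)
--         if j == -1:
--             break
--         k = j
--         while k < n and inner[k] == '\\':
--             k += 1
--         run = k - j
--         count -= run // 2          # each '\\' pair: 2 raw chars decode to 1
--         if run % 2 == 1:
--             if k < n:
--                 count -= 3 if inner[k] == 'x' else 1  # '\x' decodes to -1 net, other '\c' to 1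
--             else:
--                 count -= 1         # trailing unpaired backslash decodes to nothing
--         i = k + 1
--     return count
-- ===== Notes on version B (the rewrite author's own statement) =====
-- stated objective: alternative
-- what changed: Replaces A's per-character boolean state machine with run arithmetic: start from the raw inner length, jump between maximal backslash runs with str.find, and subtract a closed-form correction per run (run//2 for backslash pairs, 3 or 1 for an odd run's escaped char, 1 for a trailing lone backslash).
import Mathlib
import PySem

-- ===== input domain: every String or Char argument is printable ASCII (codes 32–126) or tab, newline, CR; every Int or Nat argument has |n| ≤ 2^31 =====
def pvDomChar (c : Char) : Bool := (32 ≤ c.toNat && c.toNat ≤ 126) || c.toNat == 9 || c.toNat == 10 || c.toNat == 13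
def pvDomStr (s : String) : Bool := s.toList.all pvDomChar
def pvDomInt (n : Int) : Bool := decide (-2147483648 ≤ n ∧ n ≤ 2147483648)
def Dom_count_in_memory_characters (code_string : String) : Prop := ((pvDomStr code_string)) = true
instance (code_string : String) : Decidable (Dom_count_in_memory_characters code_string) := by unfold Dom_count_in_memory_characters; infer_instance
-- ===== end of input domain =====

-- B replaces A's per-character boolean state machine with run arithmetic: start from the raw
-- inner length and subtract a closed-form correction per maximal backslash run (alternative, same cost).

-- ===== PORT A =====
-- A's loop over test_string[i] carrying (count, in_escape_sequence)
def pvAStep (st : Int × Bool) (c : Char) : Int × Bool :=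
  if st.2 then
    ((if c = 'x' then st.1 - 2 else st.1) + 1, false)
  else if c = '\\' then (st.1, true)
  else (st.1 + 1, false)

def count_in_memory_characters (code_string : String) : Int :=
  let ts := PySem.Chars.strip code_string.toList
  let inner := PySem.List.slice ts (some 1) (some (-1))
  (inner.foldl pvAStep (0, false)).1

-- ===== PORT B =====
-- the inner `while k < n and inner[k] == '\\'` run counter: length of the maximal
-- leading backslash run, and the remainder after it
def pvTakeRun : List Char → Nat × List Char
  | [] => (0, [])
  | c :: t => if c = '\\' then ((pvTakeRun t).1 + 1, (pvTakeRun t).2) else (0, c :: t)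

theorem pvTakeRun_len (l : List Char) : (pvTakeRun l).2.length ≤ l.length := by
  induction l with
  | nil => simp [pvTakeRun]
  | cons c t ih => by_cases h : c = '\\' <;> simp [pvTakeRun, h] <;> omega

-- Source B's outer while loop: `find` skips non-backslash chars; at a run, subtract run//2,
-- then 3/1 for an odd run's escaped char (or 1 for a trailing lone backslash), skip one char
def pvBGo : List Char → Int → Int
  | [], count => count
  | c :: t, count =>
    if c = '\\' then
      let run := (pvTakeRun t).1 + 1
      -- run / 2, run % 2 on Nat: exact for Python's // and % since run ≥ 0
      let count' := count - ((run / 2 : Nat) : Int)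
      if run % 2 = 1 then
        match h : (pvTakeRun t).2 with
        | [] => count' - 1
        | x :: r => pvBGo r (count' - (if x = 'x' then 3 else 1))
      else
        match h : (pvTakeRun t).2 with
        | [] => count'
        | _ :: r => pvBGo r count'
    else pvBGo t count
termination_by l => l.length
decreasing_by
  · have := pvTakeRun_len t; simp_all; omega
  · have := pvTakeRun_len t; simp_all; omega
  · simp

def count_in_memory_characters_alt (code_string : String) : Int :=
  let ts := PySem.Chars.strip code_string.toList
  let inner := PySem.List.slice ts (some 1) (some (-1))
  pvBGo inner (inner.length : Int)

-- ===== PRECONDITION & SPEC =====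
-- A raises (IndexError on empty-after-strip, or its explicit Exception) unless the stripped
-- string is nonempty and begins and ends with '"'; Pre_ is exactly that guard.
def Pre_count_in_memory_characters (code_string : String) : Prop :=
  PySem.List.pyGet? (PySem.Chars.strip code_string.toList) 0 = some '"' ∧
  PySem.List.pyGet? (PySem.Chars.strip code_string.toList) (-1) = some '"'
instance (code_string : String) : Decidable (Pre_count_in_memory_characters code_string) := by
  unfold Pre_count_in_memory_characters; infer_instance

def pvWitness_count_in_memory_characters : String := "\"ab\\x41c\""

def Spec_count_in_memory_characters (code_string : String) (out : Int) : Prop := out = count_in_memory_characters_alt code_string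
instance (code_string : String) (out : Int) : Decidable (Spec_count_in_memory_characters code_string out) := by unfold Spec_count_in_memory_characters; infer_instance

-- ===== CLAIM (what is proved, stated in full; the proofs are below) =====
def Claim_equal_count_in_memory_characters : Prop := ∀ (code_string : String), Dom_count_in_memory_characters code_string → Pre_count_in_memory_characters code_string → Spec_count_in_memory_characters code_string (count_in_memory_characters code_string)

-- ===== LEMMAS AND PROOFS =====

-- pvTakeRun decomposes a list into its maximal leading backslash run and a remainder
-- that does not start with a backslash
theorem pvTakeRun_decomp (l : List Char) :
    l = List.replicate (pvTakeRun l).1 '\\' ++ (pvTakeRun l).2 ∧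
    (∀ x r, (pvTakeRun l).2 = x :: r → x ≠ '\\') := by
  induction l with
  | nil => simp [pvTakeRun]
  | cons c t ih =>
    by_cases h : c = '\\'
    · subst h
      refine ⟨?_, ?_⟩
      · simp [pvTakeRun, List.replicate_succ]
        exact ih.1
      · intro x r hx
        exact ih.2 x r (by simpa [pvTakeRun] using hx)
    · exact ⟨by simp [pvTakeRun, h], by intro x r hx; simp [pvTakeRun, h] at hx; simp [hx.1.symm ▸ h]⟩

-- A's fold over a run of k backslashes from flag-down state
theorem pvFold_replicate (k : Nat) (c : Int) :
    List.foldl pvAStep (c, false) (List.replicate k '\\') =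
      (c + ((k / 2 : Nat) : Int), decide (k % 2 = 1)) := by
  induction k using Nat.twoStepInduction generalizing c with
  | zero => simp
  | one => simp [List.replicate_succ, pvAStep]
  | more k ih _ =>
    have hrep : List.replicate (k + 2) '\\' = '\\' :: '\\' :: List.replicate k '\\' := by
      simp [List.replicate_succ]
    rw [hrep]
    simp only [List.foldl]
    have h1 : pvAStep (c, false) '\\' = (c, true) := by simp [pvAStep]
    have h2 : pvAStep (c, true) '\\' = (c + 1, false) := by simp [pvAStep]
    rw [h1, h2, ih (c + 1)]
    have hd : ((k + 2) / 2 : Nat) = (k / 2 : Nat) + 1 := by omega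
    have hm : decide ((k + 2) % 2 = 1) = decide (k % 2 = 1) := by
      have : (k + 2) % 2 = k % 2 := by omega
      simp [this]
    rw [hd, hm]
    push_cast
    simp only [Prod.mk.injEq]
    exact ⟨by ring, trivial⟩

-- main loop lemma, by strong induction on the length
theorem pvLoop_aux : ∀ (n : Nat) (l : List Char), l.length ≤ n → ∀ (c : Int),
    (List.foldl pvAStep (c, false) l).1 = pvBGo l (c + (l.length : Int)) := by
  intro n
  induction n with
  | zero =>
    intro l hl c
    have hnil : l = [] := List.eq_nil_of_length_eq_zero (Nat.le_zero.mp hl)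
    subst hnil; simp [pvBGo]
  | succ n ih =>
    intro l hl c
    match l with
    | [] => simp [pvBGo]
    | c0 :: t =>
      by_cases h0 : c0 = '\\'
      · subst h0
        obtain ⟨hdec, hhd⟩ := pvTakeRun_decomp ('\\' :: t)
        have hpt : pvTakeRun ('\\' :: t) = ((pvTakeRun t).1 + 1, (pvTakeRun t).2) := by
          simp [pvTakeRun]
        rw [hpt] at hdec hhd
        have hlen : ('\\' :: t).length = ((pvTakeRun t).1 + 1) + (pvTakeRun t).2.length := by
          conv_lhs => rw [hdec]
          simp
        have hfold : List.foldl pvAStep (c, false) ('\\' :: t)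
            = List.foldl pvAStep (c + ((((pvTakeRun t).1 + 1) / 2 : Nat) : Int),
                decide (((pvTakeRun t).1 + 1) % 2 = 1)) (pvTakeRun t).2 := by
          conv_lhs => rw [hdec]
          rw [List.foldl_append, pvFold_replicate]
        have hrlen : (pvTakeRun t).2.length ≤ t.length := pvTakeRun_len t
        rw [hfold]
        simp only [pvBGo]
        simp only [if_true]
        by_cases hpar : ((pvTakeRun t).1 + 1) % 2 = 1
        · rw [if_pos hpar]
          split
          · rename_i hre
            rw [hre] at hlen ⊢
            simp only [List.length_nil, Nat.add_zero] at hlen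
            rw [hlen]
            simp only [List.foldl]
            omega
          · rename_i x r hre
            have hx : x ≠ '\\' := hhd x r hre
            have hrn : r.length ≤ n := by
              rw [hre] at hrlen
              simp only [List.length_cons] at hrlen hlen ⊢
              simp only [List.length_cons] at hl
              omega
            rw [hre]
            simp only [List.foldl]
            have hstep : pvAStep (c + ((((pvTakeRun t).1 + 1) / 2 : Nat) : Int),
                decide (((pvTakeRun t).1 + 1) % 2 = 1)) x
                = ((if x = 'x' then c + ((((pvTakeRun t).1 + 1) / 2 : Nat) : Int) - 2
                    else c + ((((pvTakeRun t).1 + 1) / 2 : Nat) : Int)) + 1, false) := by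
              simp [pvAStep, hpar]
            rw [hstep, ih _ hrn]
            rw [hre] at hlen
            by_cases hxx : x = 'x'
            · rw [if_pos hxx, if_pos hxx, hlen]
              congr 1
              simp only [List.length_cons]
              omega
            · rw [if_neg hxx, if_neg hxx, hlen]
              congr 1
              simp only [List.length_cons]
              omega
        · rw [if_neg hpar]
          split
          · rename_i hre
            rw [hre] at hlen ⊢
            simp only [List.length_nil, Nat.add_zero] at hlen
            rw [hlen]
            simp only [List.foldl]
            omega
          · rename_i x r hre
            have hx : x ≠ '\\' := hhd x r hre
            have hrn : r.length ≤ n := by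
              rw [hre] at hrlen
              simp only [List.length_cons] at hrlen
              simp only [List.length_cons] at hl
              omega
            rw [hre]
            simp only [List.foldl]
            have hstep : pvAStep (c + ((((pvTakeRun t).1 + 1) / 2 : Nat) : Int),
                decide (((pvTakeRun t).1 + 1) % 2 = 1)) x
                = (c + ((((pvTakeRun t).1 + 1) / 2 : Nat) : Int) + 1, false) := by
              simp [pvAStep, hpar, hx]
            rw [hstep, ih _ hrn]
            rw [hre] at hlen
            rw [hlen]
            congr 1
            simp only [List.length_cons]
            omega
      · -- ordinary character
        have hstep : pvAStep (c, false) c0 = (c + 1, false) := by simp [pvAStep, h0]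
        simp only [List.foldl, hstep, pvBGo, if_neg h0]
        rw [ih t (by simpa using hl) (c + 1)]
        congr 1
        simp only [List.length_cons]
        push_cast
        ring

theorem pvLoop_eq (l : List Char) (c : Int) :
    (List.foldl pvAStep (c, false) l).1 = pvBGo l (c + (l.length : Int)) :=
  pvLoop_aux l.length l le_rfl c

-- ===== VERDICT (by name: the statement is the Claim_ definition above) =====
theorem count_in_memory_characters_spec : Claim_equal_count_in_memory_characters := by
  intro s _ _
  unfold Spec_count_in_memory_characters count_in_memory_characters count_in_memory_characters_alt
  simpa using pvLoop_eq _ 0
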